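-- pv_equiv track=rewrite | github.com/jeffcall-ch/excel_wizadry | Price Sheet Sikla/price_sheet_db_tool.py | classify_material_type
-- ===== SOURCE A (Python) =====
-- MATERIAL_TYPE_RULES: list[dict] = [
--     {
--         "label": "04 Beam Sections",
--         "prefixes": ["TP F", "FLS", "MS"],
--         "keywords": ["channel", "rail", "profile", "beam section ms", "beam section tp"],
--     },
--     {
--         "label": "02 Brackets Consoles",
--         "prefixes": ["WD F", "WBD", "SA F"],
--         "keywords": ["bracket", "console", "base", "pivot joint", "connector", "mounting angle", "beam clip", "beam connection", "holder", "eye", "plate", "end support", "adapter", "joining"],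
--     },
--     {
--         "label": "01 Primary Supports",
--         "prefixes": ["Stabil", "Ratio"],
--         "keywords": ["clamp", "hanger", "pipe clamp", "assembly set", "fixed point", "guided", "sliding", "guiding", "assembly", "axial", "threaded rod"],
--     },
--     {
--         "label": "03 Bolts Screws Nuts",
--         "prefixes": ["HZM", "SK", "Formlock"],
--         "keywords": ["bolt", "screw", "nut", "washer", "resin anchor"],
--     },
--     {
--         "label": "05 Installation Material",
--         "prefixes": [],
--         "keywords": ["glass fabric", "end cap"],
--     },
-- ]
--
-- def classify_material_type(description: str | None) -> str:
--     if not description: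
--         return ""
--     desc_lower = description.lower()
--     for rule in MATERIAL_TYPE_RULES:
--         for prefix in rule["prefixes"]:
--             if desc_lower.startswith(prefix.lower()):
--                 return rule["label"]
--     for rule in MATERIAL_TYPE_RULES:
--         for keyword in rule["keywords"]:
--             if keyword in desc_lower:
--                 return rule["label"]
--     return ""
-- ===== SOURCE B (Python) =====
-- MATERIAL_TYPE_RULES: list[dict] = [
--     {
--         "label": "04 Beam Sections",
--         "prefixes": ["TP F", "FLS", "MS"],
--         "keywords": ["channel", "rail", "profile", "beam section ms", "beam section tp"],
--     },
--     {
--         "label": "02 Brackets Consoles",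
--         "prefixes": ["WD F", "WBD", "SA F"],
--         "keywords": ["bracket", "console", "base", "pivot joint", "connector", "mounting angle", "beam clip", "beam connection", "holder", "eye", "plate", "end support", "adapter", "joining"],
--     },
--     {
--         "label": "01 Primary Supports",
--         "prefixes": ["Stabil", "Ratio"],
--         "keywords": ["clamp", "hanger", "pipe clamp", "assembly set", "fixed point", "guided", "sliding", "guiding", "assembly", "axial", "threaded rod"],
--     },
--     {
--         "label": "03 Bolts Screws Nuts",
--         "prefixes": ["HZM", "SK", "Formlock"],
--         "keywords": ["bolt", "screw", "nut", "washer", "resin anchor"],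
--     },
--     {
--         "label": "05 Installation Material",
--         "prefixes": [],
--         "keywords": ["glass fabric", "end cap"],
--     },
-- ]
--
-- def classify_material_type(description: str | None) -> str:
--     # Single pass over the rules: each matching rule gets a numeric priority
--     # (its index for a prefix match, len(rules) + index for a keyword-only match,
--     # so every prefix match outranks every keyword match); keep the minimum.
--     if not description:
--         return ""
--     desc_lower = description.lower()
--     n = len(MATERIAL_TYPE_RULES)
--     best = None  # (priority, label)
--     for i, rule in enumerate(MATERIAL_TYPE_RULES):
--         if any(desc_lower.startswith(p.lower()) for p in rule["prefixes"]):
--             pri = i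
--         elif any(k in desc_lower for k in rule["keywords"]):
--             pri = n + i
--         else:
--             continue
--         if best is None or pri < best[0]:
--             best = (pri, rule["label"])
--     return best[1] if best is not None else ""
-- ===== Notes on version B (the rewrite author's own statement) =====
-- stated objective: alternative
-- what changed: Replaces A's two staged early-exit nested scans (all prefixes, then all keywords) by a single pass over the rules that assigns each matching rule a numeric priority (rule index for a prefix match, len(rules)+index for a keyword-only match) and keeps the minimum-priority label in an accumulator.
import Mathlib
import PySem

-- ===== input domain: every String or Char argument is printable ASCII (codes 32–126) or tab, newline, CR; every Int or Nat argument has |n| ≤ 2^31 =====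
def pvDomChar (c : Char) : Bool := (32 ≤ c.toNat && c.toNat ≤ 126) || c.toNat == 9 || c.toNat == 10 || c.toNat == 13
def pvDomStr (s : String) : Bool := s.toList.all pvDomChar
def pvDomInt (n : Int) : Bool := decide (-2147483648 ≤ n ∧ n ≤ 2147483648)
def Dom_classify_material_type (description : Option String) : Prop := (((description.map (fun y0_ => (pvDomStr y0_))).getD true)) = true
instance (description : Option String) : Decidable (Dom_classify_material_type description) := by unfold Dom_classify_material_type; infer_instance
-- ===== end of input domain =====

-- B replaces A's two staged early-exit scans by a single pass over the rules keeping a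
-- minimum-priority accumulator (prefix match = rule index, keyword-only match = n + index);
-- objective: alternative decomposition, same cost.

-- The shared module-level constant MATERIAL_TYPE_RULES: (label, prefixes, keywords)
def pvRules : List (String × List String × List String) :=
  [ ("04 Beam Sections", ["TP F", "FLS", "MS"],
      ["channel", "rail", "profile", "beam section ms", "beam section tp"]),
    ("02 Brackets Consoles", ["WD F", "WBD", "SA F"],
      ["bracket", "console", "base", "pivot joint", "connector", "mounting angle", "beam clip", "beam connection", "holder", "eye", "plate", "end support", "adapter", "joining"]),
    ("01 Primary Supports", ["Stabil", "Ratio"],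
      ["clamp", "hanger", "pipe clamp", "assembly set", "fixed point", "guided", "sliding", "guiding", "assembly", "axial", "threaded rod"]),
    ("03 Bolts Screws Nuts", ["HZM", "SK", "Formlock"],
      ["bolt", "screw", "nut", "washer", "resin anchor"]),
    ("05 Installation Material", [],
      ["glass fabric", "end cap"]) ]

-- ===== PORT A =====
-- inner loop: for prefix in rule["prefixes"]: if desc_lower.startswith(prefix.lower()): return label
def pvScanPrefixes (dl label : String) : List String → Option String
  | [] => none
  | p :: rest =>
      if PySem.Str.startswith dl (PySem.Str.lower p) then some label
      else pvScanPrefixes dl label rest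

-- first phase: for rule in MATERIAL_TYPE_RULES: (prefix loop)
def pvPhase1 (dl : String) : List (String × List String × List String) → Option String
  | [] => none
  | (label, ps, _) :: rest =>
      match pvScanPrefixes dl label ps with
      | some l => some l
      | none => pvPhase1 dl rest

-- inner loop: for keyword in rule["keywords"]: if keyword in desc_lower: return label
def pvScanKeywords (dl label : String) : List String → Option String
  | [] => none
  | k :: rest =>
      if PySem.Str.isIn k dl then some label
      else pvScanKeywords dl label rest

-- second phase: for rule in MATERIAL_TYPE_RULES: (keyword loop)
def pvPhase2 (dl : String) : List (String × List String × List String) → Option String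
  | [] => none
  | (label, _, ks) :: rest =>
      match pvScanKeywords dl label ks with
      | some l => some l
      | none => pvPhase2 dl rest

def classify_material_type (description : Option String) : String :=
  match description with
  | none => ""
  | some s =>
    if s = "" then ""
    else
      let dl := PySem.Str.lower s
      match pvPhase1 dl pvRules with
      | some l => l
      | none =>
        match pvPhase2 dl pvRules with
        | some l => l
        | none => ""

-- ===== PORT B =====
-- any(desc_lower.startswith(p.lower()) for p in rule["prefixes"])
def pvPm (dl : String) (ps : List String) : Bool :=
  ps.any (fun p => PySem.Str.startswith dl (PySem.Str.lower p))

-- any(k in desc_lower for k in rule["keywords"])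
def pvKm (dl : String) (ks : List String) : Bool :=
  ks.any (fun k => PySem.Str.isIn k dl)

-- 'if best is None or pri < best[0]: best = (pri, label)'
def pvUpdate (best : Option (Nat × String)) (pri : Nat) (label : String) : Option (Nat × String) :=
  match best with
  | none => some (pri, label)
  | some (bp, bl) => if pri < bp then some (pri, label) else some (bp, bl)

-- the single 'for i, rule in enumerate(MATERIAL_TYPE_RULES)' loop, i carried explicitly
def pvLoopB (dl : String) (n : Nat) :
    Nat → Option (Nat × String) → List (String × List String × List String) → Option (Nat × String)
  | _, best, [] => best
  | i, best, (label, ps, ks) :: rest =>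
      if pvPm dl ps then pvLoopB dl n (i+1) (pvUpdate best i label) rest
      else if pvKm dl ks then pvLoopB dl n (i+1) (pvUpdate best (n + i) label) rest
      else pvLoopB dl n (i+1) best rest

def classify_material_type_alt (description : Option String) : String :=
  match description with
  | none => ""
  | some s =>
    if s = "" then ""
    else
      match pvLoopB (PySem.Str.lower s) pvRules.length 0 none pvRules with
      | some (_, l) => l
      | none => ""

-- ===== PRECONDITION & SPEC =====
def Spec_classify_material_type (description : Option String) (out : String) : Prop := out = classify_material_type_alt description
instance (description : Option String) (out : String) : Decidable (Spec_classify_material_type description out) := by unfold Spec_classify_material_type; infer_instance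

-- ===== CLAIM (what is proved, stated in full; the proofs are below) =====
def Claim_equal_classify_material_type : Prop := ∀ (description : Option String), Dom_classify_material_type description → Spec_classify_material_type description (classify_material_type description)

-- ===== LEMMAS AND PROOFS =====

-- first prefix-matching rule, with its index (proof device)
def pvFirstPm (dl : String) : Nat → List (String × List String × List String) → Option (Nat × String)
  | _, [] => none
  | i, (label, ps, _) :: rest => if pvPm dl ps then some (i, label) else pvFirstPm dl (i+1) rest

-- first keyword-matching rule, with priority n + index (proof device)
def pvFirstKm (dl : String) (n : Nat) : Nat → List (String × List String × List String) → Option (Nat × String)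
  | _, [] => none
  | i, (label, _, ks) :: rest => if pvKm dl ks then some (n + i, label) else pvFirstKm dl n (i+1) rest

theorem scanPrefixes_eq (dl label : String) (ps : List String) :
    pvScanPrefixes dl label ps = if pvPm dl ps then some label else none := by
  induction ps with
  | nil => rfl
  | cons p rest ih =>
      simp only [pvScanPrefixes, pvPm, List.any_cons]
      by_cases h : PySem.Str.startswith dl (PySem.Str.lower p) = true <;> simp_all [pvPm]

theorem scanKeywords_eq (dl label : String) (ks : List String) :
    pvScanKeywords dl label ks = if pvKm dl ks then some label else none := by
  induction ks with
  | nil => rfl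
  | cons k rest ih =>
      simp only [pvScanKeywords, pvKm, List.any_cons]
      by_cases h : PySem.Str.isIn k dl = true <;> simp_all [pvKm]

theorem phase1_eq (dl : String) (rules : List (String × List String × List String)) :
    ∀ i, pvPhase1 dl rules = (pvFirstPm dl i rules).map Prod.snd := by
  induction rules with
  | nil => intro i; rfl
  | cons r rest ih =>
      intro i
      obtain ⟨label, ps, ks⟩ := r
      simp only [pvPhase1, pvFirstPm, scanPrefixes_eq, ih (i+1)]
      by_cases h : pvPm dl ps <;> simp [h]

theorem phase2_eq (dl : String) (n : Nat) (rules : List (String × List String × List String)) :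
    ∀ i, pvPhase2 dl rules = (pvFirstKm dl n i rules).map Prod.snd := by
  induction rules with
  | nil => intro i; rfl
  | cons r rest ih =>
      intro i
      obtain ⟨label, ps, ks⟩ := r
      simp only [pvPhase2, pvFirstKm, scanKeywords_eq, ih (i+1)]
      by_cases h : pvKm dl ks <;> simp [h]

-- invariant for a non-empty accumulator: a prefix hit (bp < n) was set at an earlier index
-- and is final; a keyword hit (bp ≥ n) can only be beaten by a later prefix hit
theorem loopB_some (dl : String) (n : Nat) (rest : List (String × List String × List String)) :
    ∀ i bp bl, i + rest.length ≤ n → bp < n + i → (bp < n → bp < i) →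
    pvLoopB dl n i (some (bp, bl)) rest =
      if bp < n then some (bp, bl) else (pvFirstPm dl i rest).or (some (bp, bl)) := by
  induction rest with
  | nil =>
      intro i bp bl _ _ _
      simp only [pvLoopB, pvFirstPm, Option.none_or]; split <;> rfl
  | cons r rest ih =>
      intro i bp bl hlen hbp hbpi
      obtain ⟨label, ps, ks⟩ := r
      simp only [List.length_cons] at hlen
      by_cases hpm : pvPm dl ps
      · have hin : i < n := by omega
        simp only [pvLoopB, hpm, if_true, pvUpdate]
        by_cases hlt : i < bp
        · have hbn : ¬ bp < n := fun h => absurd (hbpi h) (by omega)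
          rw [if_pos hlt, ih (i+1) i label (by omega) (by omega) (by omega)]
          simp [hin, hbn, pvFirstPm, hpm]
        · have hbn : bp < n := by omega
          rw [if_neg hlt, ih (i+1) bp bl (by omega) (by omega) (by omega)]
          simp [hbn]
      · by_cases hkm : pvKm dl ks
        · have hnlt : ¬ (n + i < bp) := by omega
          simp only [pvLoopB, hpm, hkm, if_true, if_false, pvUpdate, Bool.false_eq_true]
          rw [if_neg hnlt, ih (i+1) bp bl (by omega) (by omega) (by omega)]
          simp [pvFirstPm, hpm]
        · simp only [pvLoopB, hpm, hkm, if_false, Bool.false_eq_true]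
          rw [ih (i+1) bp bl (by omega) (by omega) (by omega)]
          simp [pvFirstPm, hpm]

theorem loopB_none (dl : String) (n : Nat) (rest : List (String × List String × List String)) :
    ∀ i, i + rest.length ≤ n →
    pvLoopB dl n i none rest = (pvFirstPm dl i rest).or (pvFirstKm dl n i rest) := by
  induction rest with
  | nil => intro i _; rfl
  | cons r rest ih =>
      intro i hlen
      obtain ⟨label, ps, ks⟩ := r
      simp only [List.length_cons] at hlen
      by_cases hpm : pvPm dl ps
      · have hin : i < n := by omega
        simp only [pvLoopB, hpm, if_true, pvUpdate]
        rw [loopB_some dl n rest (i+1) i label (by omega) (by omega) (by omega)]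
        simp [pvFirstPm, hpm, hin]
      · by_cases hkm : pvKm dl ks
        · simp only [pvLoopB, hpm, hkm, if_true, if_false, pvUpdate, Bool.false_eq_true]
          rw [loopB_some dl n rest (i+1) (n+i) label (by omega) (by omega) (by omega)]
          have hnn : ¬ (n + i < n) := by omega
          rw [if_neg hnn]
          simp [pvFirstPm, pvFirstKm, hpm, hkm]
        · simp only [pvLoopB, hpm, hkm, if_false, Bool.false_eq_true]
          rw [ih (i+1) (by omega)]
          simp [pvFirstPm, pvFirstKm, hpm, hkm]

-- ===== VERDICT (by name: the statement is the Claim_ definition above) =====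
theorem classify_material_type_spec : Claim_equal_classify_material_type := by
  intro description _
  unfold Spec_classify_material_type classify_material_type classify_material_type_alt
  cases description with
  | none => rfl
  | some s =>
      by_cases hs : s = ""
      · simp [hs]
      · simp only [hs, if_false]
        rw [loopB_none (PySem.Str.lower s) pvRules.length pvRules 0 (by simp),
            phase1_eq (PySem.Str.lower s) pvRules 0,
            phase2_eq (PySem.Str.lower s) pvRules.length pvRules 0]
        cases h1 : pvFirstPm (PySem.Str.lower s) 0 pvRules <;>
          cases h2 : pvFirstKm (PySem.Str.lower s) pvRules.length 0 pvRules <;> simp
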